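-- pv_equiv track=rewrite | github.com/josephmate/AdventOfCode2021 | 19_beacon_scanner/main.py | find_overlapping_orientation
-- ===== SOURCE A (Python) =====
-- def rotate_around_x(coords):
--     rotated = []
--     for (x, y, z) in coords:
--         rotated.append((x, z*-1, y))
--     return rotated
--
-- def rotate_around_z(coords):
--     rotated = []
--     for (x, y, z) in coords:
--         rotated.append((y*-1, x, z))
--     return rotated
--
-- def rotate_around_y(coords):
--     rotated = []
--     for (x, y, z) in coords:
--         rotated.append((z*-1, y, x))
--     return rotated
--
-- def generate_orientations(coords):
--     # rotate 90 degrees on yz 3 times to get all the up directions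
--     # flip
--     # rotate 90 degrees on yz 3 times to get all the up directions
--     # swap x and y of original
--     #   rotate 90 degrees on 'new yz' 3 times to get all the up directions
--     #   flip
--     #   rotate 90 degrees 'new yz' 3 times to get all the up directions
--     # swap x and z of original
--     #   rotate 90 degrees 'new yz' 3 times to get all the up directions
--     #   flip
--     #   rotate 90 degrees 'new yz' 3 times to get all the up directions
--     orientations = [coords]
--     orientations.append( rotate_around_x(orientations[len(orientations)-1]) )
--     orientations.append( rotate_around_x(orientations[len(orientations)-1]) )
--     orientations.append( rotate_around_x(orientations[len(orientations)-1]) )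
--     # After debuging, I realized that flip by multiplying an axis doesn't work.
--     # By 'flipping' youre really just rotating twice around the y axis
--     orientations.append( rotate_around_y(rotate_around_y(orientations[len(orientations)-1])) )
--     orientations.append( rotate_around_x(orientations[len(orientations)-1]) )
--     orientations.append( rotate_around_x(orientations[len(orientations)-1]) )
--     orientations.append( rotate_around_x(orientations[len(orientations)-1]) )
--
--     #       y   x
--     #       |  /
--     #       | /
--     # ------+------- z
--     #      /
--     #     /
--     # If I'm facing the x axis but I want to face the y axis, then I need to
--     # rotated about the z axis
--     orientations.append(rotate_around_z(coords))
--     # now I can rotate as if I'm facing the x-axis?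
--     # nah, I think it makes more sense to rotate in y?
--     # nah, the result looks weird. the (1,0,0) repeated as
--     #   4 (1,0,0), 4 (0,1,0) 4 (0,0,1)
--     #   so i'm going back to rotating around x
--     orientations.append( rotate_around_x(orientations[len(orientations)-1]) )
--     orientations.append( rotate_around_x(orientations[len(orientations)-1]) )
--     orientations.append( rotate_around_x(orientations[len(orientations)-1]) )
--     orientations.append( rotate_around_y(rotate_around_y(orientations[len(orientations)-1])) )
--     orientations.append( rotate_around_x(orientations[len(orientations)-1]) )
--     orientations.append( rotate_around_x(orientations[len(orientations)-1]) )
--     orientations.append( rotate_around_x(orientations[len(orientations)-1]) )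
--     # same thing but instead turn to face the y axis
--     orientations.append(rotate_around_y(coords))
--     orientations.append( rotate_around_x(orientations[len(orientations)-1]) )
--     orientations.append( rotate_around_x(orientations[len(orientations)-1]) )
--     orientations.append( rotate_around_x(orientations[len(orientations)-1]) )
--     orientations.append( rotate_around_y(rotate_around_y(orientations[len(orientations)-1])) )
--     orientations.append( rotate_around_x(orientations[len(orientations)-1]) )
--     orientations.append( rotate_around_x(orientations[len(orientations)-1]) )
--     orientations.append( rotate_around_x(orientations[len(orientations)-1]) )
--     return orientations
--
-- def translate(coords, vector):
--     (vx,vy,vz) = vector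
--     translated_coords = []
--     for (x,y,z) in coords:
--         translated_coords.append((x+vx, y+vy, z+vz))
--     return translated_coords
--
-- def translate_relative_to_coord(coords, relative_coord):
--     (rx, ry, rz) = relative_coord
--     return translate(coords, (-rx,-ry,-rz))
--
-- def find_overlapping_orientation(coords, potential_scanner, overlap_size=12):
--     for coord in coords:
--         tranlsated_coords = translate_relative_to_coord(coords, coord)
--         for potential_coords in generate_orientations(potential_scanner):
--             for potential_coord in potential_coords:
--                 tranlated_potential_coords = translate_relative_to_coord(potential_coords, potential_coord)
--                 if len(set(tranlsated_coords).intersection(set(tranlated_potential_coords))) >= overlap_size: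
--                     return ((
--                             coord[0]-potential_coord[0],
--                             coord[1]-potential_coord[1],
--                             coord[2]-potential_coord[2],
--                         ),
--                         potential_coords)
--
--     return None
-- ===== SOURCE B (Python) =====
-- def _rot(ax, cs):
--     if ax == 'x':
--         return [(x, -z, y) for (x, y, z) in cs]
--     if ax == 'y':
--         return [(-z, y, x) for (x, y, z) in cs]
--     return [(-y, x, z) for (x, y, z) in cs]
--
-- # table-driven orientation generation: for each of 3 facings, walk a fixed
-- # op-chain (3 x-rotations, a double-y "flip", 3 more x-rotations) keeping all stops
-- _FACINGS = ['', 'z', 'y']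
-- _BLOCK_OPS = ['x', 'x', 'x', 'yy', 'x', 'x', 'x']
--
-- def _orientations(coords):
--     out = []
--     for facing in _FACINGS:
--         cur = coords
--         for ax in facing:
--             cur = _rot(ax, cur)
--         out.append(cur)
--         for ops in _BLOCK_OPS:
--             for ax in ops:
--                 cur = _rot(ax, cur)
--             out.append(cur)
--     return out
--
-- def _delta_counter(cset, ori):
--     # cnt[d] = number of pairs (c, p) of DISTINCT beacons with c - p == d;
--     # this equals len(set(coords - c0) & set(ori - p0)) whenever c0 - p0 == d
--     pset = list(dict.fromkeys(ori))
--     cnt = {}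
--     for d in ((cx - px, cy - py, cz - pz)
--               for (cx, cy, cz) in cset for (px, py, pz) in pset):
--         cnt[d] = cnt.get(d, 0) + 1
--     return cnt
--
-- def find_overlapping_orientation(coords, potential_scanner, overlap_size=12):
--     cset = list(dict.fromkeys(coords))
--     tagged = [(ori, _delta_counter(cset, ori)) for ori in _orientations(potential_scanner)]
--     candidates = (((cx - px, cy - py, cz - pz), ori, cnt)
--                   for (cx, cy, cz) in coords
--                   for (ori, cnt) in tagged
--                   for (px, py, pz) in ori)
--     return next(((d, ori) for (d, ori, cnt) in candidates
--                  if cnt.get(d, 0) >= overlap_size), None)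
-- ===== Notes on version B (the rewrite author's own statement) =====
-- stated objective: faster
-- what changed: B replaces A's per-triple building and intersecting of two translated beacon sets by a per-orientation counter of pairwise differences of distinct beacons (an O(1) dictionary lookup per candidate), generates the 24 orientations by a table-driven op-chain walk instead of 24 unrolled appends, and finds the answer as the first match of one flattened lazy candidate stream instead of three nested loops.
import Mathlib
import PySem

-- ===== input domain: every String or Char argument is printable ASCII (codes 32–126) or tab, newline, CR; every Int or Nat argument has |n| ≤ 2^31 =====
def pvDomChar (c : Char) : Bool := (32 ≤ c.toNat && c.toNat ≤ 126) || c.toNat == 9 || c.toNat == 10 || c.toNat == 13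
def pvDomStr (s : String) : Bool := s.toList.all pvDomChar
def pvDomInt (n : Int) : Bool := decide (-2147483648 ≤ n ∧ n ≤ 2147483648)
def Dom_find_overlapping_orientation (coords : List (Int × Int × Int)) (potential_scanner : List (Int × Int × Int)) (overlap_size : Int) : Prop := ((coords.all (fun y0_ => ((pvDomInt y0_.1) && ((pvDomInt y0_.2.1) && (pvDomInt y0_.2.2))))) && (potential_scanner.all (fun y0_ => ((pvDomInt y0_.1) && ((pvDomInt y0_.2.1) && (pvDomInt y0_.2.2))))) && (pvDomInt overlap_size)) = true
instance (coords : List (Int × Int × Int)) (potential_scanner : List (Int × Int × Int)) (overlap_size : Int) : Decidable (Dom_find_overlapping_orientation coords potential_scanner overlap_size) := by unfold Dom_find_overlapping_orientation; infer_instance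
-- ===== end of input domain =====

-- B replaces A's per-triple set intersection by a per-orientation counter of pairwise
-- differences (O(1) lookup per candidate), generates the orientations table-driven, and
-- scans one flattened candidate stream instead of three nested loops (objective: faster).

-- ===== PORT A =====

def rotate_around_x (coords : List (Int × Int × Int)) : List (Int × Int × Int) :=
  coords.foldl (fun rotated c => rotated ++ [(c.1, c.2.2 * (-1), c.2.1)]) []

def rotate_around_z (coords : List (Int × Int × Int)) : List (Int × Int × Int) :=
  coords.foldl (fun rotated c => rotated ++ [(c.2.1 * (-1), c.1, c.2.2)]) []

def rotate_around_y (coords : List (Int × Int × Int)) : List (Int × Int × Int) :=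
  coords.foldl (fun rotated c => rotated ++ [(c.2.2 * (-1), c.2.1, c.1)]) []

def generate_orientations (coords : List (Int × Int × Int)) : List (List (Int × Int × Int)) :=
  -- Python appends to 'orientations' and reads back its last element; each 'oN' below is that element.
  let o0 := coords
  let o1 := rotate_around_x o0
  let o2 := rotate_around_x o1
  let o3 := rotate_around_x o2
  let o4 := rotate_around_y (rotate_around_y o3)
  let o5 := rotate_around_x o4
  let o6 := rotate_around_x o5
  let o7 := rotate_around_x o6
  let o8 := rotate_around_z coords
  let o9 := rotate_around_x o8
  let o10 := rotate_around_x o9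
  let o11 := rotate_around_x o10
  let o12 := rotate_around_y (rotate_around_y o11)
  let o13 := rotate_around_x o12
  let o14 := rotate_around_x o13
  let o15 := rotate_around_x o14
  let o16 := rotate_around_y coords
  let o17 := rotate_around_x o16
  let o18 := rotate_around_x o17
  let o19 := rotate_around_x o18
  let o20 := rotate_around_y (rotate_around_y o19)
  let o21 := rotate_around_x o20
  let o22 := rotate_around_x o21
  let o23 := rotate_around_x o22
  [o0, o1, o2, o3, o4, o5, o6, o7, o8, o9, o10, o11, o12, o13, o14, o15, o16, o17, o18, o19, o20, o21, o22, o23]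

def translateA (coords : List (Int × Int × Int)) (vector : Int × Int × Int) : List (Int × Int × Int) :=
  coords.foldl (fun translated_coords c => translated_coords ++ [(c.1 + vector.1, c.2.1 + vector.2.1, c.2.2 + vector.2.2)]) []

def translate_relative_to_coord (coords : List (Int × Int × Int)) (relative_coord : Int × Int × Int) : List (Int × Int × Int) :=
  translateA coords (-relative_coord.1, -relative_coord.2.1, -relative_coord.2.2)

-- inner 'for potential_coord in potential_coords' loop
def foA_pcoords (tc : List (Int × Int × Int)) (pcs : List (Int × Int × Int)) (coord : Int × Int × Int) (k : Int) :
    List (Int × Int × Int) → Option ((Int × Int × Int) × (List (Int × Int × Int)))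
  | [] => none
  | p :: rest =>
    if (PySem.Set.len (PySem.Set.inter (PySem.Set.ofList tc) (PySem.Set.ofList (translate_relative_to_coord pcs p)))) ≥ k then
      some ((coord.1 - p.1, coord.2.1 - p.2.1, coord.2.2 - p.2.2), pcs)
    else foA_pcoords tc pcs coord k rest

-- middle 'for potential_coords in generate_orientations(...)' loop
def foA_oris (tc : List (Int × Int × Int)) (coord : Int × Int × Int) (k : Int) :
    List (List (Int × Int × Int)) → Option ((Int × Int × Int) × (List (Int × Int × Int)))
  | [] => none
  | pcs :: rest =>
    match foA_pcoords tc pcs coord k pcs with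
    | some r => some r
    | none => foA_oris tc coord k rest

-- outer 'for coord in coords' loop
def foA_coords (full : List (Int × Int × Int)) (pot : List (Int × Int × Int)) (k : Int) :
    List (Int × Int × Int) → Option ((Int × Int × Int) × (List (Int × Int × Int)))
  | [] => none
  | coord :: rest =>
    match foA_oris (translate_relative_to_coord full coord) coord k (generate_orientations pot) with
    | some r => some r
    | none => foA_coords full pot k rest

def find_overlapping_orientation (coords : List (Int × Int × Int)) (potential_scanner : List (Int × Int × Int)) (overlap_size : Int) : Option ((Int × Int × Int) × (List (Int × Int × Int))) :=
  foA_coords coords potential_scanner overlap_size coords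

-- ===== PORT B =====

def rotAx (ax : Char) (cs : List (Int × Int × Int)) : List (Int × Int × Int) :=
  if ax = 'x' then cs.map (fun c => (c.1, -c.2.2, c.2.1))
  else if ax = 'y' then cs.map (fun c => (-c.2.2, c.2.1, c.1))
  else cs.map (fun c => (-c.2.1, c.1, c.2.2))

-- table-driven orientation generation: per facing, walk the fixed op-chain keeping all stops
def orientationsB (coords : List (Int × Int × Int)) : List (List (Int × Int × Int)) :=
  ([[], ['z'], ['y']] : List (List Char)).flatMap (fun facing =>
    let start := facing.foldl (fun cs ax => rotAx ax cs) coords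
    (([['x'], ['x'], ['x'], ['y', 'y'], ['x'], ['x'], ['x']] : List (List Char)).foldl
      (fun (st : (List (Int × Int × Int)) × List (List (Int × Int × Int))) ops =>
        let nxt := ops.foldl (fun cs ax => rotAx ax cs) st.1
        (nxt, st.2 ++ [nxt]))
      (start, [start])).2)

def subV (a b : Int × Int × Int) : Int × Int × Int :=
  (a.1 - b.1, a.2.1 - b.2.1, a.2.2 - b.2.2)

-- counter of pairwise differences of distinct beacons ('for d in deltas: cnt[d] = cnt.get(d,0)+1')
def cntB (cset : List (Int × Int × Int)) (ori : List (Int × Int × Int)) : PySem.Dict (Int × Int × Int) Int :=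
  let pset := PySem.List.dedup ori
  (cset.flatMap (fun c => pset.map (fun p => subV c p))).foldl
    (fun cnt d => cnt.modify d 0 (· + 1)) PySem.Dict.empty

def find_overlapping_orientation_alt (coords : List (Int × Int × Int)) (potential_scanner : List (Int × Int × Int)) (overlap_size : Int) : Option ((Int × Int × Int) × (List (Int × Int × Int))) :=
  let cset := PySem.List.dedup coords
  let tagged := (orientationsB potential_scanner).map (fun ori => (ori, cntB cset ori))
  let candidates := coords.flatMap (fun c => tagged.flatMap (fun t => t.1.map (fun p => (subV c p, t))))
  (candidates.find? (fun x => decide (x.2.2.getD x.1 0 ≥ overlap_size))).map (fun x => (x.1, x.2.1))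

-- ===== PRECONDITION & SPEC =====
def Spec_find_overlapping_orientation (coords : List (Int × Int × Int)) (potential_scanner : List (Int × Int × Int)) (overlap_size : Int) (out : Option ((Int × Int × Int) × (List (Int × Int × Int)))) : Prop := out = find_overlapping_orientation_alt coords potential_scanner overlap_size
instance (coords : List (Int × Int × Int)) (potential_scanner : List (Int × Int × Int)) (overlap_size : Int) (out : Option ((Int × Int × Int) × (List (Int × Int × Int)))) : Decidable (Spec_find_overlapping_orientation coords potential_scanner overlap_size out) := by unfold Spec_find_overlapping_orientation; infer_instance

-- ===== CLAIM (what is proved, stated in full; the proofs are below) =====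
def Claim_equal_find_overlapping_orientation : Prop := ∀ (coords : List (Int × Int × Int)) (potential_scanner : List (Int × Int × Int)) (overlap_size : Int), Dom_find_overlapping_orientation coords potential_scanner overlap_size → Spec_find_overlapping_orientation coords potential_scanner overlap_size (find_overlapping_orientation coords potential_scanner overlap_size)

-- ===== LEMMAS AND PROOFS =====

-- A's rotations are the corresponding maps
theorem rotate_around_x_eq (cs : List (Int × Int × Int)) : rotate_around_x cs = rotAx 'x' cs := by
  unfold rotate_around_x rotAx
  rw [PySem.List.foldl_append_singleton_eq_map]
  simp

theorem rotate_around_y_eq (cs : List (Int × Int × Int)) : rotate_around_y cs = rotAx 'y' cs := by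
  unfold rotate_around_y rotAx
  rw [PySem.List.foldl_append_singleton_eq_map]
  simp

theorem rotate_around_z_eq (cs : List (Int × Int × Int)) : rotate_around_z cs = rotAx 'z' cs := by
  unfold rotate_around_z rotAx
  rw [PySem.List.foldl_append_singleton_eq_map]
  simp

theorem generate_orientations_eq (cs : List (Int × Int × Int)) :
    generate_orientations cs = orientationsB cs := by
  simp [generate_orientations, orientationsB, rotate_around_x_eq, rotate_around_y_eq,
    rotate_around_z_eq, List.foldl]

-- translation relative to r is the map (subV · r)
theorem translate_relative_eq (cs : List (Int × Int × Int)) (r : Int × Int × Int) :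
    translate_relative_to_coord cs r = cs.map (fun c => subV c r) := by
  unfold translate_relative_to_coord translateA
  rw [PySem.List.foldl_append_singleton_eq_map]
  simp [subV, sub_eq_add_neg]

theorem subV_cancel (c d : Int × Int × Int) : subV c (subV c d) = d := by
  rcases d with ⟨d1, d2, d3⟩
  simp [subV]

theorem subV_right_inj (c : Int × Int × Int) : Function.Injective (fun p => subV c p) := by
  intro a b h
  rcases a with ⟨a1, a2, a3⟩; rcases b with ⟨b1, b2, b3⟩
  simp only [subV, Prod.mk.injEq] at h ⊢
  omega

theorem subV_left_inj (r : Int × Int × Int) : Function.Injective (fun c => subV c r) := by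
  intro a b h
  rcases a with ⟨a1, a2, a3⟩; rcases b with ⟨b1, b2, b3⟩
  simp only [subV, Prod.mk.injEq] at h ⊢
  omega

-- pushing an injective map through Set.ofList
theorem ofList_map_inj {f : (Int × Int × Int) → (Int × Int × Int)} (hf : Function.Injective f)
    (xs : List (Int × Int × Int)) :
    PySem.Set.ofList (xs.map f) = (PySem.Set.ofList xs).map f := by
  induction xs with
  | nil => rfl
  | cons x xs ih =>
    simp only [List.map_cons, PySem.Set.ofList_cons, ih, PySem.Set.discard, List.filter_map]
    refine congrArg _ (congrArg _ (List.filter_congr ?_))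
    intro a _
    simp [Function.comp, hf.eq_iff]

-- the counter value is the number of distinct coords c with (c - d) among the orientation points
theorem cntB_getD (cset ori : List (Int × Int × Int)) (d : Int × Int × Int) :
    (cntB cset ori).getD d 0
      = (cset.countP (fun c => decide (subV c d ∈ ori)) : Int) := by
  unfold cntB
  rw [PySem.Dict.getD_foldl_modify_add_one, PySem.Dict.getD_empty, zero_add]
  induction cset with
  | nil => simp
  | cons c cs ih =>
    rw [List.flatMap_cons, List.count_append, List.countP_cons]
    have hmapcount : ((PySem.List.dedup ori).map (fun p => subV c p)).count d
        = (PySem.List.dedup ori).count (subV c d) := by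
      conv_lhs => rw [← subV_cancel c d]
      exact List.count_map_of_injective _ _ (subV_right_inj c) _
    have hcount : (PySem.List.dedup ori).count (subV c d)
        = if subV c d ∈ ori then 1 else 0 := by
      by_cases h : subV c d ∈ ori
      · rw [if_pos h]
        exact List.count_eq_one_of_mem (PySem.List.nodup_dedup ori)
          ((PySem.List.mem_dedup _ _).mpr h)
      · rw [if_neg h]
        exact List.count_eq_zero_of_not_mem (fun hc => h ((PySem.List.mem_dedup _ _).mp hc))
    rw [hmapcount, hcount]
    by_cases h : subV c d ∈ ori
    · simp only [h, if_true, decide_true]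
      push_cast
      push_cast at ih
      omega
    · simp only [h, if_false, decide_false]
      push_cast
      push_cast at ih
      omega

-- A's per-triple intersection size equals B's counter lookup
theorem check_eq (full pcs : List (Int × Int × Int)) (coord p : Int × Int × Int) :
    PySem.Set.len (PySem.Set.inter (PySem.Set.ofList (translate_relative_to_coord full coord))
        (PySem.Set.ofList (translate_relative_to_coord pcs p)))
      = (cntB (PySem.List.dedup full) pcs).getD (subV coord p) 0 := by
  have hL : PySem.Set.ofList (translate_relative_to_coord full coord)
      = (PySem.Set.ofList full).map (fun c => subV c coord) := by
    rw [translate_relative_eq, ofList_map_inj (subV_left_inj coord)]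
  have hR : PySem.Set.ofList (translate_relative_to_coord pcs p)
      = (PySem.Set.ofList pcs).map (fun q => subV q p) := by
    rw [translate_relative_eq, ofList_map_inj (subV_left_inj p)]
  rw [hL, hR, cntB_getD]
  have hmem : ∀ c : Int × Int × Int,
      ((fun c => subV c coord) c ∈ (PySem.Set.ofList pcs).map (fun q => subV q p))
        ↔ subV c (subV coord p) ∈ pcs := by
    intro c
    simp only [List.mem_map, PySem.Set.mem_ofList]
    constructor
    · rintro ⟨q, hq, hEq⟩
      have : q = subV c (subV coord p) := by
        rcases c with ⟨c1, c2, c3⟩; rcases q with ⟨q1, q2, q3⟩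
        rcases coord with ⟨x1, x2, x3⟩; rcases p with ⟨p1, p2, p3⟩
        simp only [subV, Prod.mk.injEq] at hEq ⊢
        omega
      exact this ▸ hq
    · intro hq
      refine ⟨subV c (subV coord p), hq, ?_⟩
      rcases c with ⟨c1, c2, c3⟩
      rcases coord with ⟨x1, x2, x3⟩; rcases p with ⟨p1, p2, p3⟩
      simp only [subV, Prod.mk.injEq]
      omega
  simp only [PySem.Set.len, PySem.Set.inter]
  rw [List.filter_map, List.length_map, ← List.countP_eq_length_filter,
    PySem.List.dedup_eq_ofList]
  congr 1
  apply List.countP_congr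
  intro c _
  simp only [Function.comp, PySem.Set.contains_eq_listContains, List.contains_iff_mem]
  simp [hmem c]

-- B's search predicate and post-processing
def predB (k : Int) (x : (Int × Int × Int) × ((List (Int × Int × Int)) × PySem.Dict (Int × Int × Int) Int)) : Bool :=
  decide (x.2.2.getD x.1 0 ≥ k)

-- level 1: A's inner loop is find? over the mapped point list
theorem pcoords_eq (full pcs : List (Int × Int × Int)) (coord : Int × Int × Int) (k : Int)
    (rem : List (Int × Int × Int)) :
    foA_pcoords (translate_relative_to_coord full coord) pcs coord k rem
      = ((rem.map (fun p => (subV coord p, (pcs, cntB (PySem.List.dedup full) pcs)))).find?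
          (predB k)).map (fun x => (x.1, x.2.1)) := by
  induction rem with
  | nil => rfl
  | cons p rest ih =>
    simp only [foA_pcoords, List.map_cons]
    rw [check_eq full pcs coord p]
    by_cases h : (cntB (PySem.List.dedup full) pcs).getD (subV coord p) 0 ≥ k
    · rw [if_pos h, List.find?_cons_of_pos (by simpa [predB] using h)]
      rfl
    · rw [if_neg h, List.find?_cons_of_neg (by simpa [predB] using h), ih]

-- level 2: A's orientation loop is find? over the flattened tagged stream
theorem oris_eq (full : List (Int × Int × Int)) (coord : Int × Int × Int) (k : Int)
    (oris : List (List (Int × Int × Int))) :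
    foA_oris (translate_relative_to_coord full coord) coord k oris
      = (((oris.map (fun ori => (ori, cntB (PySem.List.dedup full) ori))).flatMap
            (fun t => t.1.map (fun p => (subV coord p, t)))).find? (predB k)).map
          (fun x => (x.1, x.2.1)) := by
  induction oris with
  | nil => rfl
  | cons pcs rest ih =>
    simp only [List.map_cons, List.flatMap_cons, List.find?_append, foA_oris, pcoords_eq, ih]
    cases hfind : (pcs.map (fun p => (subV coord p, (pcs, cntB (PySem.List.dedup full) pcs)))).find? (predB k) with
    | some r => simp
    | none => simp

-- level 3: A's outer loop is find? over the fully flattened candidate stream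
theorem coords_eq (full pot : List (Int × Int × Int)) (k : Int)
    (rem : List (Int × Int × Int)) :
    foA_coords full pot k rem
      = ((rem.flatMap (fun c =>
            ((orientationsB pot).map (fun ori => (ori, cntB (PySem.List.dedup full) ori))).flatMap
              (fun t => t.1.map (fun p => (subV c p, t))))).find? (predB k)).map
          (fun x => (x.1, x.2.1)) := by
  induction rem with
  | nil => rfl
  | cons coord rest ih =>
    simp only [List.flatMap_cons, List.find?_append, foA_coords, generate_orientations_eq, oris_eq, ih]
    cases hfind : (((orientationsB pot).map (fun ori => (ori, cntB (PySem.List.dedup full) ori))).flatMap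
        (fun t => t.1.map (fun p => (subV coord p, t)))).find? (predB k) with
    | some r => simp
    | none => simp

-- ===== VERDICT (by name: the statement is the Claim_ definition above) =====
theorem find_overlapping_orientation_spec : Claim_equal_find_overlapping_orientation := by
  intro coords pot k _
  unfold Spec_find_overlapping_orientation find_overlapping_orientation find_overlapping_orientation_alt
  simpa [predB] using coords_eq coords pot k coords
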